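-- pv_equiv track=rewrite | github.com/DarfilalAbdou/pychatbot-Moriamez-Darfilal-INT3 | test.py | quest
-- ===== SOURCE A (Python) =====
-- def quest(st):
--     exeption = "çàéèêëïù0123456789"
--     # Start reading each lines in the doc
--     lines = st
--     # Turn each letter in lowercase
--     lines = lines.lower()
--
--     # delete every \n
--     lines = lines.replace(chr(10), "")
--     # We keep every letter and special letter in "exeption" in lines, otherwise the symbols become space
--     lines = [x if (x >= "a" and x <= "z") or x in exeption else " " for x in lines]
--     lines = ("".join(lines)).split(" ")
--     lines=[x for x in lines if len(x)>0]
--     return lines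
-- ===== SOURCE B (Python) =====
-- def quest(st):
--     exeption = "çàéèêëïù0123456789"
--     res = []
--     buf = ""
--     for x in st.lower():
--         if ("a" <= x <= "z") or x in exeption:
--             buf += x
--         elif x == chr(10):
--             pass  # newlines are deleted, never act as separators
--         else:
--             if buf:
--                 res.append(buf)
--             buf = ""
--     if buf:
--         res.append(buf)
--     return res
-- ===== Notes on version B (the rewrite author's own statement) =====
-- stated objective: alternative
-- what changed: Replaces A's five-pass pipeline (lower, replace-newlines, per-char substitution to spaces, join+split on space, filter empties) by a single pass over the lowered string that maintains a current-token buffer and flushes it at separators, skipping newlines.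
import Mathlib
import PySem

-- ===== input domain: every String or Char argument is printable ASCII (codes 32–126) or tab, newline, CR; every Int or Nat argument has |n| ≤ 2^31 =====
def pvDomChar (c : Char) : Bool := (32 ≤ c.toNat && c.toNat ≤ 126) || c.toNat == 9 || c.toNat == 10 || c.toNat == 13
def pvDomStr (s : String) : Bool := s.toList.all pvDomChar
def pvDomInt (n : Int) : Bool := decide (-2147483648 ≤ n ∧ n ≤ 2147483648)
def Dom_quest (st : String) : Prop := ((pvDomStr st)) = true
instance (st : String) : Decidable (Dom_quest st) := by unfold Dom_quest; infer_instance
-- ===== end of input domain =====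

-- B replaces A's five-pass lower/replace/substitute/join-split/filter pipeline by a single
-- buffered pass over the lowered string (objective: alternative; same return value).

-- ===== PORT A =====
-- Python's `x >= "a" and x <= "z"` compares 1-char strings, which is exactly
-- code-point comparison on the chars; `x in exeption` is membership in its chars.
def quest (st : String) : List String :=
  let exeption : List Char := "çàéèêëïù0123456789".toList
  let lines0 := st
  let lines1 := PySem.Chars.lower lines0.toList
  let lines2 := PySem.Chars.replace lines1 [Char.ofNat 10] []
  let lines3 := lines2.map (fun x =>
    if (decide ('a' ≤ x) && decide (x ≤ 'z')) || exeption.contains x then x else ' ')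
  let lines4 := PySem.Chars.splitOn (PySem.Chars.join [] (lines3.map (fun x => [x]))) [' ']
  let lines5 := lines4.filter (fun x => decide (x.length > 0))
  lines5.map String.ofList

-- ===== PORT B =====
-- Source B's string buffer `buf` is kept as List Char (`buf += x` ↦ `buf ++ [x]`); each
-- appended token is the buffer's string.
def quest_alt (st : String) : List String :=
  let exeption : List Char := "çàéèêëïù0123456789".toList
  let p := (PySem.Chars.lower st.toList).foldl
    (fun (s : List String × List Char) x =>
      if (decide ('a' ≤ x) && decide (x ≤ 'z')) || exeption.contains x then
        (s.1, s.2 ++ [x])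
      else if x = Char.ofNat 10 then s
      else if s.2.isEmpty then (s.1, []) else (s.1 ++ [String.ofList s.2], []))
    ([], [])
  if p.2.isEmpty then p.1 else p.1 ++ [String.ofList p.2]

-- ===== PRECONDITION & SPEC =====
def Spec_quest (st : String) (out : List String) : Prop := out = quest_alt st
instance (st : String) (out : List String) : Decidable (Spec_quest st out) := by unfold Spec_quest; infer_instance

-- ===== CLAIM (what is proved, stated in full; the proofs are below) =====
def Claim_equal_quest : Prop := ∀ (st : String), Dom_quest st → Spec_quest st (quest st)

-- ===== LEMMAS AND PROOFS =====

-- the shared keep-this-character test of both programs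
def pvKeep (x : Char) : Bool :=
  (decide ('a' ≤ x) && decide (x ≤ 'z')) || ("çàéèêëïù0123456789".toList).contains x

lemma pvKeep_ne_space {c : Char} (h : pvKeep c = true) : c ≠ ' ' := by
  rintro rfl; exact absurd h (by decide)

lemma pvKeep_ne_nl {c : Char} (h : pvKeep c = true) : c ≠ Char.ofNat 10 := by
  rintro rfl; exact absurd h (by decide)

-- space-separated pieces of (map f cs), phrased on cs itself (A's split, pre-filter)
def pvSplitSp (buf : List Char) : List Char → List (List Char)
  | [] => [buf]
  | c :: cs => if pvKeep c then pvSplitSp (buf ++ [c]) cs else buf :: pvSplitSp [] cs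

-- the common reference: nonempty maximal keep-blocks of cs as strings
def pvToks (buf : List Char) : List Char → List String
  | [] => if buf.isEmpty then [] else [String.ofList buf]
  | c :: cs => if pvKeep c then pvToks (buf ++ [c]) cs
               else (if buf.isEmpty then [] else [String.ofList buf]) ++ pvToks [] cs

-- B's loop body and post-loop flush, named for the invariant lemma
def pvStep (s : List String × List Char) (x : Char) : List String × List Char :=
  if pvKeep x then (s.1, s.2 ++ [x])
  else if x = Char.ofNat 10 then s
  else if s.2.isEmpty then (s.1, []) else (s.1 ++ [String.ofList s.2], [])

def pvFin (p : List String × List Char) : List String :=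
  if p.2.isEmpty then p.1 else p.1 ++ [String.ofList p.2]

-- A's replace(chr(10), "") deletes the newlines
lemma pv_rgo (l : List Char) : ∀ (fuel : Nat) (acc : List Char), l.length ≤ fuel →
    PySem.Chars.replace.go [Char.ofNat 10] [] fuel l acc
      = acc.reverse ++ l.filter (fun c => !(c == Char.ofNat 10)) := by
  induction l with
  | nil => intro fuel acc _; cases fuel <;> simp [PySem.Chars.replace.go]
  | cons c t ih =>
    intro fuel acc hf
    cases fuel with
    | zero => simp at hf
    | succ f =>
      have hlen : t.length ≤ f := by simpa using hf
      by_cases hc : c = Char.ofNat 10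
      · subst hc
        simp [PySem.Chars.replace.go, List.isPrefixOf, ih f acc hlen]
      · simp [PySem.Chars.replace.go, List.isPrefixOf, hc, ih f (c :: acc) hlen,
              Ne.symm hc]

lemma pv_replace_filter (l : List Char) :
    PySem.Chars.replace l [Char.ofNat 10] [] = l.filter (fun c => !(c == Char.ofNat 10)) := by
  simpa [PySem.Chars.replace] using pv_rgo l l.length [] le_rfl

-- A's split(" ") on the space-substituted list, as pvSplitSp of the original list
lemma pv_sgo (cs : List Char) : ∀ (fuel : Nat) (cur : List Char) (acc : List (List Char)),
    cs.length ≤ fuel →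
    PySem.Chars.splitOn.go [' '] fuel
        (cs.map (fun x => if pvKeep x then x else ' ')) cur acc
      = acc.reverse ++ pvSplitSp cur.reverse cs := by
  induction cs with
  | nil => intro fuel cur acc _; cases fuel <;> simp [PySem.Chars.splitOn.go, pvSplitSp]
  | cons c t ih =>
    intro fuel cur acc hf
    cases fuel with
    | zero => simp at hf
    | succ f =>
      have hlen : t.length ≤ f := by simpa using hf
      by_cases hk : pvKeep c
      · have hcs : c ≠ ' ' := pvKeep_ne_space hk
        simp [PySem.Chars.splitOn.go, List.isPrefixOf, hk, Ne.symm hcs,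
              ih f (c :: cur) acc hlen, pvSplitSp]
      · simp [PySem.Chars.splitOn.go, List.isPrefixOf, hk,
              ih f [] (cur.reverse :: acc) hlen, pvSplitSp]

-- A's final filter of empty pieces turns pvSplitSp into pvToks
lemma pv_filter_splitSp (cs : List Char) : ∀ (buf : List Char),
    ((pvSplitSp buf cs).filter (fun x => decide (x.length > 0))).map String.ofList
      = pvToks buf cs := by
  induction cs with
  | nil => intro buf; cases buf <;> simp [pvSplitSp, pvToks]
  | cons c t ih =>
    intro buf
    by_cases hk : pvKeep c
    · simp [pvSplitSp, pvToks, hk, ih]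
    · cases buf <;> simp [pvSplitSp, pvToks, hk, ih]

-- B's loop invariant: the fold plus final flush yields pvToks of the newline-free list
lemma pv_fold (cs : List Char) : ∀ (res : List String) (buf : List Char),
    pvFin (cs.foldl pvStep (res, buf))
      = res ++ pvToks buf (cs.filter (fun c => !(c == Char.ofNat 10))) := by
  induction cs with
  | nil => intro res buf; cases buf <;> simp [pvFin, pvToks]
  | cons c t ih =>
    intro res buf
    rw [List.foldl_cons]
    by_cases hk : pvKeep c
    · have hnl := pvKeep_ne_nl hk
      have hs : pvStep (res, buf) c = (res, buf ++ [c]) := by simp [pvStep, hk]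
      rw [hs, ih]
      simp [hnl, pvToks, hk]
    · by_cases hnl : c = Char.ofNat 10
      · subst hnl
        have hs : pvStep (res, buf) (Char.ofNat 10) = (res, buf) := by simp [pvStep, hk]
        rw [hs, ih]; simp
      · cases hb : buf.isEmpty
        · have hs : pvStep (res, buf) c = (res ++ [String.ofList buf], []) := by
            simp [pvStep, hk, hnl, hb]
          rw [hs, ih]
          simp [hnl, pvToks, hk, List.isEmpty_eq_false_iff.mp hb]
        · have hs : pvStep (res, buf) c = (res, []) := by simp [pvStep, hk, hnl, hb]
          rw [hs, ih]
          simp [hnl, pvToks, hk, List.isEmpty_iff.mp hb]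

lemma pv_quest_eq (st : String) :
    quest st = pvToks [] ((PySem.Chars.lower st.toList).filter (fun c => !(c == Char.ofNat 10))) := by
  unfold quest
  dsimp only
  rw [show (fun x : Char =>
        if (decide ('a' ≤ x) && decide (x ≤ 'z')) || ("çàéèêëïù0123456789".toList).contains x
        then x else ' ') = (fun x => if pvKeep x then x else ' ') from rfl]
  rw [pv_replace_filter]
  set L2 := (PySem.Chars.lower st.toList).filter (fun c => !(c == Char.ofNat 10)) with hL2
  rw [PySem.Chars.join_nil_singletons]
  show (((PySem.Chars.splitOn (L2.map (fun x => if pvKeep x then x else ' ')) [' ']).filter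
      (fun x => decide (x.length > 0))).map String.ofList) = pvToks [] L2
  unfold PySem.Chars.splitOn
  rw [pv_sgo L2 _ [] [] (by simp)]
  simpa using pv_filter_splitSp L2 []

lemma pv_quest_alt_eq (st : String) :
    quest_alt st = pvToks [] ((PySem.Chars.lower st.toList).filter (fun c => !(c == Char.ofNat 10))) := by
  unfold quest_alt
  dsimp only
  rw [show (fun (s : List String × List Char) (x : Char) =>
        if (decide ('a' ≤ x) && decide (x ≤ 'z')) || ("çàéèêëïù0123456789".toList).contains x
        then (s.1, s.2 ++ [x])
        else if x = Char.ofNat 10 then s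
        else if s.2.isEmpty then (s.1, []) else (s.1 ++ [String.ofList s.2], [])) = pvStep from rfl]
  exact pv_fold (PySem.Chars.lower st.toList) [] []

-- ===== VERDICT (by name: the statement is the Claim_ definition above) =====
theorem quest_spec : Claim_equal_quest := by
  intro st _
  unfold Spec_quest
  rw [pv_quest_eq, pv_quest_alt_eq]
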